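-- pv_equiv track=rewrite | github.com/kynk94/torch-firewood | tests/helpers/utils.py | power_of_2
-- ===== SOURCE A (Python) =====
-- from typing import Any, Iterable, List, Tuple, Union
--
-- def power_of_2(n: int, reverse: bool = False) -> List[int]:
--     if reverse:
--         i = 2 ** (n - 1)
--         for _ in range(n):
--             yield i
--             i >>= 1
--     else:
--         i = 1
--         for _ in range(n):
--             yield i
--             i <<= 1
-- ===== SOURCE B (Python) =====
-- def power_of_2(n: int, reverse: bool = False):
--     # stateless: each yielded value is a closed form of its index
--     for j in range(n):
--         yield 1 << (n - 1 - j) if reverse else 1 << j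
-- ===== Notes on version B (the rewrite author's own statement) =====
-- stated objective: alternative
-- what changed: Replaced the mutated running accumulator (shifted/doubled each iteration) with a stateless per-index closed form 2**j / 2**(n-1-j).
import Mathlib
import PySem

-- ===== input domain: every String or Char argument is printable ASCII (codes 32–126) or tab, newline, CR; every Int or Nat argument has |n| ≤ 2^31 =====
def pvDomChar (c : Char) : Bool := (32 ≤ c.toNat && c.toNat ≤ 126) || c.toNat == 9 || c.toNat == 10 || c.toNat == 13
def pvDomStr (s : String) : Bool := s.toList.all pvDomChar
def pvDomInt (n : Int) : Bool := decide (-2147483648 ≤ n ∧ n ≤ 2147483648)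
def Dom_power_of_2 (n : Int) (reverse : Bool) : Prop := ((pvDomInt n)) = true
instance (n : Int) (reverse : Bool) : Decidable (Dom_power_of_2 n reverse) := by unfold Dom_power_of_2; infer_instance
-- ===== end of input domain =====

-- B replaces A's mutated running value (shifted each iteration) with a stateless closed form of the index.
-- A is a generator; the ports return the list of yielded values.
-- ===== PORT A =====
-- for n <= 0 Python's initial `2 ** (n - 1)` is an unused float 0.5; the port's unused `2 ^ (n-1).toNat` is equally dead (the loop is empty).
def power_of_2 (n : Int) (reverse : Bool) : List Int :=
  if reverse then
    ((PySem.List.pyRange 0 n 1).foldl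
      (fun (s : List Int × Int) _ => (s.1 ++ [s.2], PySem.Int.floordiv s.2 2))
      ([], 2 ^ (n - 1).toNat)).1
  else
    ((PySem.List.pyRange 0 n 1).foldl
      (fun (s : List Int × Int) _ => (s.1 ++ [s.2], s.2 * 2))
      ([], 1)).1

-- ===== PORT B =====
def power_of_2_alt (n : Int) (reverse : Bool) : List Int :=
  (PySem.List.pyRange 0 n 1).map
    (fun j => if reverse then 2 ^ (n - 1 - j).toNat else 2 ^ j.toNat)

-- ===== PRECONDITION & SPEC =====
def Spec_power_of_2 (n : Int) (reverse : Bool) (out : List Int) : Prop := out = power_of_2_alt n reverse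
instance (n : Int) (reverse : Bool) (out : List Int) : Decidable (Spec_power_of_2 n reverse out) := by unfold Spec_power_of_2; infer_instance

-- ===== CLAIM (what is proved, stated in full; the proofs are below) =====
def Claim_equal_power_of_2 : Prop := ∀ (n : Int) (reverse : Bool), Dom_power_of_2 n reverse → Spec_power_of_2 n reverse (power_of_2 n reverse)

-- ===== LEMMAS AND PROOFS =====

-- ===== VERDICT (by name: the statement is the Claim_ definition above) =====
-- fold with an element-ignoring body is an iterate of the step
theorem foldl_ignore {α β : Type} (g : β → β) (l : List α) (init : β) :
    l.foldl (fun s _ => g s) init = g^[l.length] init := by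
  induction l generalizing init with
  | nil => rfl
  | cons a t ih => simp [List.foldl, ih, Function.iterate_succ_apply]

theorem fwd_iter (m : Nat) (i : Int) (acc : List Int) :
    ((fun (s : List Int × Int) => (s.1 ++ [s.2], s.2 * 2))^[m] (acc, i)).1
      = acc ++ (List.range m).map (fun j => i * 2 ^ j) := by
  induction m generalizing i acc with
  | zero => simp
  | succ m ih =>
    rw [Function.iterate_succ_apply, ih]
    simp [List.range_succ_eq_map, List.map_map, Function.comp, pow_succ]
    intro a _
    ring

theorem rev_iter (m p : Nat) (acc : List Int) (h : m ≤ p + 1) :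
    ((fun (s : List Int × Int) => (s.1 ++ [s.2], PySem.Int.floordiv s.2 2))^[m] (acc, 2 ^ p)).1
      = acc ++ (List.range m).map (fun j => 2 ^ (p - j)) := by
  induction m generalizing p acc with
  | zero => simp
  | succ m ih =>
    rw [Function.iterate_succ_apply]
    cases p with
    | zero =>
      have hm : m = 0 := by omega
      subst hm
      simp [List.range_succ]
    | succ q =>
      have hf : PySem.Int.floordiv ((2:Int) ^ (q + 1)) 2 = 2 ^ q := by
        simp [PySem.Int.floordiv, pow_succ]
      rw [hf, ih q _ (by omega)]
      simp [List.range_succ_eq_map, List.map_map, Function.comp]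

theorem power_of_2_spec : Claim_equal_power_of_2 := by
  intro n reverse _
  unfold Spec_power_of_2 power_of_2 power_of_2_alt
  rw [PySem.List.pyRange_one 0 n]
  simp only [zero_add, List.foldl_map, List.map_map]
  rw [foldl_ignore, foldl_ignore]
  cases reverse with
  | false =>
    simp only [Bool.false_eq_true, if_false]
    rw [List.length_range, fwd_iter]
    simp [Function.comp]
  | true =>
    simp only [if_true]
    rw [List.length_range,
        rev_iter (n - 0).toNat (n - 1).toNat [] (by omega)]
    simp only [List.nil_append]
    apply List.map_congr_left
    intro k hk
    simp only [List.mem_range] at hk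
    show (2:Int) ^ ((n - 1).toNat - k) = 2 ^ (n - 1 - (k : Int)).toNat
    congr 1
    omega
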